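-- pv_equiv track=rewrite | github.com/daniel-reich/ubiquitous-fiesta | QcswPnY2cAbrfwuWE_6.py | filter_factorials
-- ===== SOURCE A (Python) =====
-- def filter_factorials(numbers):
--   factorial = lambda x: 1 if x == 1 else x * factorial(x-1)
--   i = 1
--   ans = []
--   while factorial(i) <= max(numbers):
--     if factorial(i) in numbers: ans.append(factorial(i))
--     i += 1
--   return ans
-- ===== SOURCE B (Python) =====
-- def filter_factorials(numbers):
--     m = max(numbers)
--     present = set(numbers)
--     ans = []
--     f = 1
--     i = 1
--     while f <= m:
--         if f in present:
--             ans.append(f)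
--         i += 1
--         f *= i
--     return ans
-- ===== Notes on version B (the rewrite author's own statement) =====
-- stated objective: faster
-- what changed: B computes max(numbers) once and builds a set for O(1) membership, and maintains the running factorial incrementally (f *= i) instead of re-running the recursive factorial lambda (three times per iteration) and re-scanning the list for max and membership on every iteration.
import Mathlib
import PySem

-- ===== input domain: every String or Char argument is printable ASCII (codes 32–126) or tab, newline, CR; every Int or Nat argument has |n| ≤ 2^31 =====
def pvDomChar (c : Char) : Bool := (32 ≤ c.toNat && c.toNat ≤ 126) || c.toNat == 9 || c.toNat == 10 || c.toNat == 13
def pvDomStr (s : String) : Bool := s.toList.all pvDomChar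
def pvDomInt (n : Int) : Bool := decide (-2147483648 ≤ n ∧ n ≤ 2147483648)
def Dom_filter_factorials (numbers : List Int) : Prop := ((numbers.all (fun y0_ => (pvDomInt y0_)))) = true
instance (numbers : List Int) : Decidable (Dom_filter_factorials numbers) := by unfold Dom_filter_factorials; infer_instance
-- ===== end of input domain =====

-- B replaces A's per-iteration recursive factorial, per-iteration max(numbers) scan and list
-- membership by a single max, a set, and an incrementally maintained factorial (objective: faster).

-- ===== PORT A =====
-- A's recursive lambda 'factorial'; A only calls it with i ≥ 1 (exact there; the 0 case is unreachable).
def factA : Nat → Int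
  | 0 => 1
  | 1 => 1
  | (n+2) => ((n : Int) + 2) * factA (n+1)

-- needed for the while-loop's termination measure
theorem le_factA : ∀ n : Nat, (n : Int) ≤ factA n := by
  intro n
  induction n with
  | zero => simp [factA]
  | succ k ih =>
    match k, ih with
    | 0, _ => simp [factA]
    | (m+1), ih =>
      show ((m+2 : Nat) : Int) ≤ ((m : Int) + 2) * factA (m+1)
      have h1 : (1 : Int) ≤ factA (m+1) := le_factA_pos m
      push_cast
      nlinarith
where
  le_factA_pos : ∀ m : Nat, (1 : Int) ≤ factA (m+1) := by
    intro m
    induction m with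
    | zero => simp [factA]
    | succ k ih =>
      show (1 : Int) ≤ ((k : Int) + 2) * factA (k+1)
      nlinarith

-- A's while loop; m = max(numbers), loop-invariant, hoisted out unchanged
def loopA (m : Int) (ns : List Int) (i : Nat) : List Int :=
  if _h : factA i ≤ m then
    (if ns.contains (factA i) then [factA i] else []) ++ loopA m ns (i+1)
  else []
termination_by m.toNat + 1 - i
decreasing_by
  have h2 := le_factA i
  omega

def filter_factorials (numbers : List Int) : List Int :=
  match PySem.List.max? numbers (fun x => x) with
  | none => []          -- Python raises ValueError on max([]); excluded by Pre_
  | some m => loopA m numbers 1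

-- ===== PORT B =====
-- B's while loop: fuel bounds the recursion (always sufficient at the call site since f = i! ≥ i);
-- i is the counter, f the running factorial
def loopB (m : Int) (s : PySem.Set Int) : Nat → Nat → Int → List Int
  | 0, _, _ => []
  | fuel+1, i, f =>
    if f ≤ m then
      (if PySem.Set.contains s f then [f] else []) ++ loopB m s fuel (i+1) (f * ((i : Int) + 1))
    else []

def filter_factorials_alt (numbers : List Int) : List Int :=
  match PySem.List.max? numbers (fun x => x) with
  | none => []          -- Python raises ValueError on max([]); excluded by Pre_
  | some m => loopB m (PySem.Set.ofList numbers) (m.toNat + 2) 1 1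

-- ===== PRECONDITION & SPEC =====
-- Python A (and B) raise ValueError on the empty list (max of empty sequence)
def Pre_filter_factorials (numbers : List Int) : Prop := numbers ≠ []
instance (numbers : List Int) : Decidable (Pre_filter_factorials numbers) := by
  unfold Pre_filter_factorials; infer_instance
def pvWitness_filter_factorials : List Int := [1, 2, 3, 7, 24, 120]

def Spec_filter_factorials (numbers : List Int) (out : List Int) : Prop := out = filter_factorials_alt numbers
instance (numbers : List Int) (out : List Int) : Decidable (Spec_filter_factorials numbers out) := by unfold Spec_filter_factorials; infer_instance

-- ===== CLAIM (what is proved, stated in full; the proofs are below) =====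
def Claim_equal_filter_factorials : Prop := ∀ (numbers : List Int), Dom_filter_factorials numbers → Pre_filter_factorials numbers → Spec_filter_factorials numbers (filter_factorials numbers)

-- ===== LEMMAS AND PROOFS =====

theorem factA_succ (i : Nat) : factA (i+1) = factA i * ((i : Int) + 1) := by
  match i with
  | 0 => simp [factA]
  | (k+1) =>
    show ((k : Int) + 2) * factA (k+1) = factA (k+1) * ((k : Int) + 1 + 1)
    ring

theorem contains_ofList (ns : List Int) (x : Int) :
    PySem.Set.contains (PySem.Set.ofList ns) x = ns.contains x := by
  simp [PySem.Set.contains, PySem.Set.mem_ofList]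

theorem loop_eq (m : Int) (ns : List Int) :
    ∀ fuel i, m.toNat + 1 ≤ fuel + i →
      loopB m (PySem.Set.ofList ns) fuel i (factA i) = loopA m ns i := by
  intro fuel
  induction fuel with
  | zero =>
    intro i hi
    have hfa := le_factA i
    have hlt : ¬ factA i ≤ m := by omega
    rw [loopA, dif_neg hlt]
    rfl
  | succ k ih =>
    intro i hi
    rw [loopA, loopB]
    by_cases h : factA i ≤ m
    · rw [dif_pos h, if_pos h, contains_ofList]
      have : factA i * ((i : Int) + 1) = factA (i+1) := (factA_succ i).symm
      rw [this, ih (i+1) (by omega)]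
    · rw [dif_neg h, if_neg h]

-- ===== VERDICT (by name: the statement is the Claim_ definition above) =====
theorem filter_factorials_spec : Claim_equal_filter_factorials := by
  intro numbers _ _
  unfold Spec_filter_factorials filter_factorials filter_factorials_alt
  cases hm : PySem.List.max? numbers (fun x => x) with
  | none => rfl
  | some m =>
    show loopA m numbers 1 = loopB m (PySem.Set.ofList numbers) (m.toNat + 2) 1 1
    exact (loop_eq m numbers (m.toNat + 2) 1 (by omega)).symm
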